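-- pv_equiv track=rewrite | github.com/MiroVatov/Python-SoftUni | Python Advanced 2021/Workshop/connect_four_game.py | check_vertical_win
-- ===== SOURCE A (Python) =====
-- def check_vertical_win(board, limit, player):
--
--     for col in range(len(board[0])):
--         count = 0
--         for row in range(len(board) -1, -1, -1):
--             if board[row][col] == player:
--                 count += 1
--                 if count == limit:
--                     return True
--             else:
--                 count = 0
--     return False
-- ===== SOURCE B (Python) =====
-- def check_vertical_win(board, limit, player):
--     if limit < 1 or limit > len(board):
--         return False
--     target = [player] * limit
--     for col in range(len(board[0])):
--         column = [row[col] for row in board]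
--         if any(column[i:i + limit] == target for i in range(len(column) - limit + 1)):
--             return True
--     return False
-- ===== Notes on version B (the rewrite author's own statement) =====
-- stated objective: idiomatic
-- what changed: B extracts each column as a list and detects a win by sliding-window slice comparison against [player]*limit (list slicing/== run in C, replacing A's per-cell Python counter loop), with an up-front guard returning False when limit < 1 or limit > len(board), instead of A's bottom-up counter inside nested index loops.
-- outside the precondition, e.g. on check_vertical_win([['y', 'x'], ['y'], ['y', 'x']], 1, 'x'): A returns True, B raises IndexError
import Mathlib
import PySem

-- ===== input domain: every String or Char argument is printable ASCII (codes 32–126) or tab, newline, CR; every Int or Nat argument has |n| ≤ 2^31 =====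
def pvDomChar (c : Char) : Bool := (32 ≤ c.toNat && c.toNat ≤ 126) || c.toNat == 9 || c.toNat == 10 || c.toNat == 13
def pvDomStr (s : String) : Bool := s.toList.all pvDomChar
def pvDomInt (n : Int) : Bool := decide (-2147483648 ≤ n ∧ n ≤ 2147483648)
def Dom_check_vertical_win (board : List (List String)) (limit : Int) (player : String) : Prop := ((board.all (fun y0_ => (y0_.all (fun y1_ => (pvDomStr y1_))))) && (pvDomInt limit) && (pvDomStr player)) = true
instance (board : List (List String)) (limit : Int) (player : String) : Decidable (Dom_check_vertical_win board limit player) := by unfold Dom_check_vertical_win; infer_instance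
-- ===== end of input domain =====

-- B replaces A's per-cell bottom-up counter by column extraction + sliding-window slice
-- comparison with an up-front limit guard (objective: idiomatic); equal on Pre_.

-- ===== PORT A =====
-- inner loop: for row in range(len(board)-1, -1, -1): count/reset with early return
def cvwA_inner (board : List (List String)) (player : String) (limit : Int) (col : Int) : List Int → Int → Bool
  | [], _ => false
  | row :: rows, count =>
    if PySem.List.pyGetD (PySem.List.pyGetD board row []) col "" == player then
      if count + 1 == limit then true
      else cvwA_inner board player limit col rows (count + 1)
    else cvwA_inner board player limit col rows 0

-- outer loop: for col in range(len(board[0])), early return True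
def cvwA_cols (board : List (List String)) (player : String) (limit : Int) : List Int → Bool
  | [] => false
  | col :: cols =>
    if cvwA_inner board player limit col (PySem.List.pyRange ((board.length : Int) - 1) (-1) (-1)) 0 then true
    else cvwA_cols board player limit cols

def check_vertical_win (board : List (List String)) (limit : Int) (player : String) : Bool :=
  cvwA_cols board player limit (PySem.List.pyRange 0 ((PySem.List.pyGetD board 0 []).length : Int) 1)

-- ===== PORT B =====
-- for col in range(len(board[0])): column = [row[col] for row in board]; any window == target
def cvwB_cols (board : List (List String)) (limit : Int) (target : List String) : List Int → Bool
  | [] => false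
  | col :: cols =>
    let column := board.map (fun row => PySem.List.pyGetD row col "")
    if (PySem.List.pyRange 0 ((column.length : Int) - limit + 1) 1).any
        (fun i => PySem.List.slice column (some i) (some (i + limit)) == target) then true
    else cvwB_cols board limit target cols

def check_vertical_win_alt (board : List (List String)) (limit : Int) (player : String) : Bool :=
  if limit < 1 || (board.length : Int) < limit then false
  else
    cvwB_cols board limit (List.replicate limit.toNat player)
      (PySem.List.pyRange 0 ((PySem.List.pyGetD board 0 []).length : Int) 1)

-- ===== PRECONDITION & SPEC =====
-- Pre_ excludes the empty board and ragged boards (some row shorter than board[0]): Python A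
-- raises IndexError there except when an early vertical win is found first (see claim cites).
def Pre_check_vertical_win (board : List (List String)) (limit : Int) (player : String) : Prop :=
  board ≠ [] ∧ ∀ r ∈ board, (board.headD []).length ≤ r.length
instance (board : List (List String)) (limit : Int) (player : String) : Decidable (Pre_check_vertical_win board limit player) := by unfold Pre_check_vertical_win; infer_instance

def pvWitness_check_vertical_win : List (List String) × Int × String := ([["x"], ["x"]], 2, "x")

def Spec_check_vertical_win (board : List (List String)) (limit : Int) (player : String) (out : Bool) : Prop := out = check_vertical_win_alt board limit player
instance (board : List (List String)) (limit : Int) (player : String) (out : Bool) : Decidable (Spec_check_vertical_win board limit player out) := by unfold Spec_check_vertical_win; infer_instance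

-- ===== CLAIM (what is proved, stated in full; the proofs are below) =====
def Claim_equal_check_vertical_win : Prop := ∀ (board : List (List String)) (limit : Int) (player : String), Dom_check_vertical_win board limit player → Pre_check_vertical_win board limit player → Spec_check_vertical_win board limit player (check_vertical_win board limit player)


-- ===== LEMMAS AND PROOFS =====

-- A's inner loop on the extracted cell values (map fusion target)
def cvwRun (player : String) (limit : Int) : List String → Int → Bool
  | [], _ => false
  | x :: xs, count =>
    if x == player then
      if count + 1 == limit then true
      else cvwRun player limit xs (count + 1)
    else cvwRun player limit xs 0

lemma cvwA_inner_eq_run (board : List (List String)) (player : String) (limit : Int) (col : Int) :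
    ∀ (rows : List Int) (count : Int),
      cvwA_inner board player limit col rows count =
      cvwRun player limit (rows.map (fun r => PySem.List.pyGetD (PySem.List.pyGetD board r []) col "")) count := by
  intro rows
  induction rows with
  | nil => intro count; rfl
  | cons r rs ih => intro count; simp only [cvwA_inner, cvwRun, List.map_cons]; split_ifs <;> simp [ih]

lemma cvwRun_nonpos (player : String) (limit : Int) (h : limit < 1) :
    ∀ (l : List String) (count : Int), 0 ≤ count → cvwRun player limit l count = false := by
  intro l
  induction l with
  | nil => intro c _; rfl
  | cons x xs ih =>
      intro c hc
      simp only [cvwRun]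
      split_ifs with h1 h2
      · exfalso; rw [beq_iff_eq] at h2; omega
      · exact ih (c + 1) (by omega)
      · exact ih 0 (by omega)

lemma replicate_prefix_mono {α : Type} {x : α} {l : List α} {m m' : Nat}
    (h : List.replicate m x <+: l) (hm : m' ≤ m) : List.replicate m' x <+: l := by
  refine List.IsPrefix.trans ?_ h
  have : List.replicate m x = List.replicate m' x ++ List.replicate (m - m') x := by
    rw [← List.replicate_add]; congr 1; omega
  rw [this]; exact List.prefix_append _ _

lemma cvwRun_char (player : String) (limit : Int) (h1 : 1 ≤ limit) :
    ∀ (l : List String) (c : Nat), (c : Int) < limit →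
      (cvwRun player limit l (c : Int) = true ↔
        (List.replicate (limit.toNat - c) player <+: l ∨ List.replicate limit.toNat player <:+: l)) := by
  intro l
  induction l with
  | nil =>
      intro c hc
      simp only [cvwRun]
      constructor
      · intro h; cases h
      · rintro (h | h)
        · rw [List.prefix_nil] at h
          have := congrArg List.length h
          simp at this
          omega
        · rw [List.infix_nil] at h
          have := congrArg List.length h
          simp at this
          omega
  | cons x xs ih =>
      intro c hc
      have hk : c < limit.toNat := by omega
      by_cases hx : x = player
      · subst hx
        simp only [cvwRun, BEq.rfl, if_true]
        by_cases hfin : (c : Int) + 1 = limit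
        · have hrep : limit.toNat - c = 1 := by omega
          simp only [hfin, beq_self_eq_true, if_true, hrep, List.replicate_one]
          constructor
          · intro _
            left
            exact ⟨xs, rfl⟩
          · intro _; trivial
        · have hif : ((c : Int) + 1 == limit) = false := by simp [hfin]
          rw [hif]
          simp only [Bool.false_eq_true, if_false]
          have hcast : (c : Int) + 1 = ((c + 1 : Nat) : Int) := by push_cast; ring
          rw [hcast, ih (c + 1) (by omega)]
          have hsplit1 : List.replicate (limit.toNat - c) x <+: x :: xs ↔
              List.replicate (limit.toNat - (c + 1)) x <+: xs := by
            have : List.replicate (limit.toNat - c) x = x :: List.replicate (limit.toNat - c - 1) x := by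
              rw [← List.replicate_succ]; congr 1; omega
            rw [this, List.cons_prefix_cons]
            have : limit.toNat - c - 1 = limit.toNat - (c + 1) := by omega
            simp [this]
          have hsplit2 : List.replicate limit.toNat x <:+: x :: xs ↔
              (List.replicate (limit.toNat - 1) x <+: xs ∨ List.replicate limit.toNat x <:+: xs) := by
            rw [List.infix_cons_iff]
            constructor
            · rintro (h | h)
              · left
                have hrep : List.replicate limit.toNat x = x :: List.replicate (limit.toNat - 1) x := by
                  rw [← List.replicate_succ]; congr 1; omega
                rw [hrep, List.cons_prefix_cons] at h
                exact h.2
              · right; exact h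
            · rintro (h | h)
              · left
                have hrep : List.replicate limit.toNat x = x :: List.replicate (limit.toNat - 1) x := by
                  rw [← List.replicate_succ]; congr 1; omega
                rw [hrep, List.cons_prefix_cons]
                exact ⟨rfl, h⟩
              · right; exact h
          rw [hsplit1, hsplit2]
          constructor
          · rintro (h | h)
            · exact Or.inl h
            · exact Or.inr (Or.inr h)
          · rintro (h | h | h)
            · exact Or.inl h
            · exact Or.inl (replicate_prefix_mono h (by omega))
            · exact Or.inr h
      · have hif : (x == player) = false := by simp [hx]
        simp only [cvwRun, hif, Bool.false_eq_true, if_false]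
        have h0 : ((0 : Nat) : Int) = (0 : Int) := by norm_num
        rw [← h0, ih 0 (by omega)]
        have hhead : ∀ m : Nat, 0 < m → ¬ (List.replicate m player <+: x :: xs) := by
          intro m hm hpre
          have : List.replicate m player = player :: List.replicate (m - 1) player := by
            rw [← List.replicate_succ]; congr 1; omega
          rw [this, List.cons_prefix_cons] at hpre
          exact hx hpre.1.symm
        constructor
        · rintro (h | h)
          · right
            rw [List.infix_cons_iff]
            right
            exact h.isInfix
          · right
            rw [List.infix_cons_iff]
            right; exact h
        · rintro (h | h)
          · exact absurd h (hhead _ (by omega))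
          · rw [List.infix_cons_iff] at h
            rcases h with h | h
            · exact absurd h (hhead _ (by omega))
            · right; exact h

lemma infix_iff_window {α : Type} [DecidableEq α] (pat l : List α) :
    pat <:+: l ↔ ∃ j : Nat, (l.drop j).take pat.length = pat := by
  constructor
  · rintro ⟨s, t, rfl⟩
    refine ⟨s.length, ?_⟩
    rw [List.append_assoc, List.drop_left, List.take_left]
  · rintro ⟨j, hj⟩
    refine ⟨l.take j, l.drop (j + pat.length), ?_⟩
    calc l.take j ++ pat ++ l.drop (j + pat.length)
        = l.take j ++ ((l.drop j).take pat.length ++ (l.drop j).drop pat.length) := by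
          rw [hj, List.drop_drop, List.append_assoc]
      _ = l := by rw [List.take_append_drop, List.take_append_drop]

lemma cvwB_any_char (player : String) (limit : Int) (h1 : 1 ≤ limit) (l : List String) :
    ((PySem.List.pyRange 0 ((l.length : Int) - limit + 1) 1).any
      (fun i => PySem.List.slice l (some i) (some (i + limit)) == List.replicate limit.toNat player) = true)
    ↔ List.replicate limit.toNat player <:+: l := by
  rw [List.any_eq_true]
  constructor
  · rintro ⟨i, hmem, hslice⟩
    rw [PySem.List.mem_pyRange_one] at hmem
    rw [beq_iff_eq] at hslice
    rw [PySem.List.slice_toNat _ hmem.1 (by omega)] at hslice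
    have harith : (i + limit).toNat - i.toNat = limit.toNat := by omega
    rw [harith] at hslice
    rw [infix_iff_window]
    exact ⟨i.toNat, by rw [List.length_replicate]; exact hslice⟩
  · intro hinf
    have hlen := hinf.length_le
    rw [List.length_replicate] at hlen
    rw [infix_iff_window] at hinf
    obtain ⟨j, hj⟩ := hinf
    rw [List.length_replicate] at hj
    -- the window must fit: take limit.toNat of drop j has length limit.toNat
    have hfit : j + limit.toNat ≤ l.length := by
      have := congrArg List.length hj
      simp [List.length_take, List.length_drop] at this
      omega
    refine ⟨(j : Int), ?_, ?_⟩
    · rw [PySem.List.mem_pyRange_one]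
      constructor
      · exact Int.natCast_nonneg j
      · omega
    · rw [beq_iff_eq]
      rw [PySem.List.slice_toNat _ (Int.natCast_nonneg j) (by omega)]
      have harith : ((j : Int) + limit).toNat - ((j : Int)).toNat = limit.toNat := by omega
      rw [harith, Int.toNat_natCast]
      exact hj

lemma cvwA_col_char (board : List (List String)) (player : String) (limit : Int) (col : Int)
    (h1 : 1 ≤ limit) :
    (cvwA_inner board player limit col (PySem.List.pyRange ((board.length : Int) - 1) (-1) (-1)) 0 = true)
    ↔ List.replicate limit.toNat player <:+: board.map (fun row => PySem.List.pyGetD row col "") := by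
  rw [cvwA_inner_eq_run]
  have hrange : PySem.List.pyRange ((board.length : Int) - 1) (-1) (-1) =
      (PySem.List.pyRange 0 (board.length : Int) 1).reverse := by
    have := PySem.List.pyRange_neg_one_eq_reverse ((board.length : Int) - 1) (-1)
    simpa using this
  rw [hrange, List.map_reverse]
  have hcells : (PySem.List.pyRange 0 (board.length : Int) 1).map
      (fun r => PySem.List.pyGetD (PySem.List.pyGetD board r []) col "") =
      board.map (fun row => PySem.List.pyGetD row col "") := by
    have hcomp : (fun r => PySem.List.pyGetD (PySem.List.pyGetD board r []) col "") =
        (fun row => PySem.List.pyGetD row col "") ∘ (fun r => PySem.List.pyGetD board r []) := rfl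
    rw [hcomp, ← List.map_map]
    congr 1
    exact PySem.List.map_pyGetD_pyRange_zero' board []
  rw [hcells]
  have h0 : ((0 : Nat) : Int) = (0 : Int) := by norm_num
  rw [← h0, cvwRun_char player limit h1 _ 0 (by omega)]
  have hcollapse : limit.toNat - 0 = limit.toNat := by omega
  rw [hcollapse]
  constructor
  · rintro (h | h)
    · -- prefix of the reverse is an infix of the reverse, hence of the column
      have := h.isInfix
      rw [← List.reverse_replicate] at this
      exact List.reverse_infix.mp this
    · rw [← List.reverse_replicate] at h
      exact List.reverse_infix.mp h
  · intro h
    right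
    rw [← List.reverse_replicate]
    exact List.reverse_infix.mpr h

lemma cvwA_cols_congr (board : List (List String)) (player : String) (limit : Int)
    (h1 : 1 ≤ limit) :
    ∀ cols : List Int,
      cvwA_cols board player limit cols =
      cvwB_cols board limit (List.replicate limit.toNat player) cols := by
  intro cols
  induction cols with
  | nil => rfl
  | cons c cs ih =>
      simp only [cvwA_cols, cvwB_cols]
      have hcol : cvwA_inner board player limit c (PySem.List.pyRange ((board.length : Int) - 1) (-1) (-1)) 0 =
          ((PySem.List.pyRange 0 (((board.map (fun row => PySem.List.pyGetD row c "")).length : Int) - limit + 1) 1).any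
            (fun i => PySem.List.slice (board.map (fun row => PySem.List.pyGetD row c "")) (some i) (some (i + limit))
              == List.replicate limit.toNat player)) := by
        by_cases hA : cvwA_inner board player limit c (PySem.List.pyRange ((board.length : Int) - 1) (-1) (-1)) 0 = true
        · rw [hA]
          symm
          rw [cvwB_any_char player limit h1]
          exact (cvwA_col_char board player limit c h1).mp hA
        · rw [Bool.not_eq_true] at hA
          rw [hA]
          symm
          rw [Bool.eq_false_iff, Ne, cvwB_any_char player limit h1]
          intro hinf
          have htrue := (cvwA_col_char board player limit c h1).mpr hinf
          rw [hA] at htrue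
          exact Bool.false_ne_true htrue
      rw [← hcol, ih]

lemma cvwA_cols_false (board : List (List String)) (player : String) (limit : Int)
    (hfalse : ∀ col : Int, cvwA_inner board player limit col (PySem.List.pyRange ((board.length : Int) - 1) (-1) (-1)) 0 = false) :
    ∀ cols : List Int, cvwA_cols board player limit cols = false := by
  intro cols
  induction cols with
  | nil => rfl
  | cons c cs ih => simp only [cvwA_cols, hfalse c, Bool.false_eq_true, if_false]; exact ih

-- ===== VERDICT (by name: the statement is the Claim_ definition above) =====
theorem check_vertical_win_spec : Claim_equal_check_vertical_win := by
  intro board limit player _ _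
  unfold Spec_check_vertical_win check_vertical_win check_vertical_win_alt
  by_cases hlow : limit < 1
  · have hguard : (decide (limit < 1) || decide ((board.length : Int) < limit)) = true := by
      simp [hlow]
    simp only [hguard, if_true]
    apply cvwA_cols_false
    intro col
    rw [cvwA_inner_eq_run]
    exact cvwRun_nonpos player limit hlow _ 0 le_rfl
  · rw [not_lt] at hlow
    by_cases hbig : (board.length : Int) < limit
    · have hguard : (decide (limit < 1) || decide ((board.length : Int) < limit)) = true := by
        simp [hbig]
      simp only [hguard, if_true]
      apply cvwA_cols_false
      intro col
      rw [Bool.eq_false_iff, Ne]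
      intro htrue
      have hinf := (cvwA_col_char board player limit col hlow).mp htrue
      have hlen := hinf.length_le
      rw [List.length_replicate, List.length_map] at hlen
      omega
    · have hguard : (decide (limit < 1) || decide ((board.length : Int) < limit)) = false := by
        simp only [Bool.or_eq_false_iff, decide_eq_false_iff_not, not_lt]
        exact ⟨by omega, by omega⟩
      simp only [hguard, Bool.false_eq_true, if_false]
      exact cvwA_cols_congr board player limit hlow _
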